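-- pv_equiv track=rewrite | github.com/bitsofbits/advent_of_code | 2023/day_10/pythonimp/implementation.py | count_inside_locations
-- ===== SOURCE A (Python) =====
-- def count_inside_locations(board):
--     max_i = max(i for (i, j) in board)
--     max_j = max(j for (i, j) in board)
--     count = 0
--     for i in range(max_i + 1):
--         is_inside = False
--         for j in range(max_j + 1):
--             symbol = board.get((i, j), '.')
--             if symbol in '7F|':
--                 is_inside = not is_inside
--             elif symbol == '.' and is_inside:
--                 count += 1
--     return count
-- ===== SOURCE B (Python) =====
-- def bisect_left(a, x):
--     lo, hi = 0, len(a)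
--     while lo < hi:
--         mid = (lo + hi) // 2
--         if a[mid] < x:
--             lo = mid + 1
--         else:
--             hi = mid
--     return lo
--
--
-- def count_inside_locations(board):
--     max_i = max(i for (i, j) in board)
--     max_j = max(j for (i, j) in board)
--     rows = {}
--     for (i, j), s in board.items():
--         if 0 <= i and 0 <= j:
--             rows.setdefault(i, []).append((j, s))
--     count = 0
--     for i, cells in rows.items():
--         cells.sort()
--         bs = [j for (j, s) in cells if s in '7F|']
--         rem = bs
--         while len(rem) >= 2:
--             count += rem[1] - rem[0]
--             rem = rem[2:]
--         if rem:
--             count += max_j - rem[0]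
--         for (j, s) in cells:
--             if s != '.' and bisect_left(bs, j) % 2 == 1:
--                 count -= 1
--     return count
-- ===== Notes on version B (the rewrite author's own statement) =====
-- stated objective: alternative
-- what changed: Instead of toggling an inside/outside flag over every cell of the bounding box, B groups the present cells by row, derives each row's sorted boundary columns, adds up the odd-crossing-parity interval lengths in closed form, and subtracts present non-'.' cells at odd parity found by binary search; Pre_ excludes only the empty board, on which both A and B raise ValueError.
import Mathlib
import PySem

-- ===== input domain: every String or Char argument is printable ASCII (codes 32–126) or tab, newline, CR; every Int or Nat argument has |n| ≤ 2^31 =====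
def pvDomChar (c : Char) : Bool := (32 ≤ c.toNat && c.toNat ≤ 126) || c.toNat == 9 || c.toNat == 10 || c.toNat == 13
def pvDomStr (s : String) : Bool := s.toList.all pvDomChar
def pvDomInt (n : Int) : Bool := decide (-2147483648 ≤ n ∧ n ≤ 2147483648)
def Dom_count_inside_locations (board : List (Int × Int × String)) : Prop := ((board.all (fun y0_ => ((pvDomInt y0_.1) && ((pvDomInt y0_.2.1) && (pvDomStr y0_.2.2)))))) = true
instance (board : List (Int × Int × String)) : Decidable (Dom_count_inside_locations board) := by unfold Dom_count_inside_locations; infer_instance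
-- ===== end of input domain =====

-- B replaces A's cell-by-cell inside/outside toggle scan of the whole bounding box by grouping the
-- present cells by row and computing, per row, the odd-crossing-parity interval lengths from the
-- sorted boundary columns (subtracting present non-'.' cells at odd parity via binary search).

-- ===== PORT A =====
-- the board dict {(i,j): s} as a PySem.Dict keyed by the (i,j) pair
def pvBoardDictA (board : List (Int × Int × String)) : PySem.Dict (Int × Int) String :=
  PySem.Dict.ofList (board.map (fun p => ((p.1, p.2.1), p.2.2)))

def count_inside_locations (board : List (Int × Int × String)) : Int :=
  match PySem.List.max? (board.map (fun p => p.1)) (fun x => x),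
        PySem.List.max? (board.map (fun p => p.2.1)) (fun x => x) with
  | some max_i, some max_j =>
      (PySem.List.pyRange 0 (max_i + 1) 1).foldl (fun count i =>
        ((PySem.List.pyRange 0 (max_j + 1) 1).foldl (fun (st : Bool × Int) j =>
            let symbol := PySem.Dict.getD (pvBoardDictA board) (i, j) "."
            if PySem.Str.isIn symbol "7F|" then (!st.1, st.2)
            else if symbol == "." && st.1 then (st.1, st.2 + 1)
            else st) (false, count)).2) 0
  | _, _ => 0  -- unreachable under Pre_ (Python raises ValueError on an empty board)

-- ===== PORT B =====
-- B's own copy of the board-dict view (the ports share no definitions)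
def pvBoardDictB (board : List (Int × Int × String)) : PySem.Dict (Int × Int) String :=
  PySem.Dict.ofList (board.map (fun p => ((p.1, p.2.1), p.2.2)))

-- sum of the paired gaps bs[1]-bs[0], bs[3]-bs[2], ..., plus max_j - bs[-1] for an unpaired last one
-- (the Python while-loop over rem = rem[2:], transcribed as two-at-a-time structural recursion)
def pvRowIntervals (max_j : Int) : List Int → Int → Int
  | b0 :: b1 :: rest, count => pvRowIntervals max_j rest (count + (b1 - b0))
  | [b], count => count + (max_j - b)
  | [], count => count

def count_inside_locations_alt (board : List (Int × Int × String)) : Int :=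
  match PySem.List.max? (board.map (fun p => p.1)) (fun x => x) with
  | none => 0  -- unreachable under Pre_
  | some _max_i =>
    match PySem.List.max? (board.map (fun p => p.2.1)) (fun x => x) with
    | none => 0  -- unreachable under Pre_
    | some max_j =>
      let rows : PySem.Dict Int (List (Int × String)) :=
        (pvBoardDictB board).items.foldl (fun d p =>
          if 0 ≤ p.1.1 && 0 ≤ p.1.2 then d.modify p.1.1 [] (· ++ [(p.1.2, p.2)]) else d)
          PySem.Dict.empty
      rows.items.foldl (fun count ic =>
        -- cells.sort(): the column values are dict keys of one row, hence distinct, so Python's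
        -- lexicographic sort of the (j, s) pairs is exactly the sort on j
        let cells := PySem.List.sorted ic.2 (fun c => c.1) false
        let bs := (cells.filter (fun c => PySem.Str.isIn c.2 "7F|")).map (fun c => c.1)
        cells.foldl (fun count c =>
          if !(c.2 == ".") && (PySem.List.bisectLeft bs c.1 % 2 == 1) then count - 1 else count)
          (pvRowIntervals max_j bs count)) 0

-- ===== PRECONDITION & SPEC =====
-- Pre_ excludes only the empty board, on which Python A raises ValueError (max of an empty sequence).
def Pre_count_inside_locations (board : List (Int × Int × String)) : Prop := board ≠ []
instance (board : List (Int × Int × String)) : Decidable (Pre_count_inside_locations board) := by unfold Pre_count_inside_locations; infer_instance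
def pvWitness_count_inside_locations : (List (Int × Int × String)) := [(0, 0, "|"), (0, 1, ".")]

def Spec_count_inside_locations (board : List (Int × Int × String)) (out : Int) : Prop := out = count_inside_locations_alt board
instance (board : List (Int × Int × String)) (out : Int) : Decidable (Spec_count_inside_locations board out) := by unfold Spec_count_inside_locations; infer_instance

-- ===== CLAIM (what is proved, stated in full; the proofs are below) =====
def Claim_equal_count_inside_locations : Prop := ∀ (board : List (Int × Int × String)), Dom_count_inside_locations board → Pre_count_inside_locations board → Spec_count_inside_locations board (count_inside_locations board)

-- ===== LEMMAS AND PROOFS =====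

-- bisect_left on a ≤-sorted list returns the number of elements strictly below x
theorem bisectLeft_eq_countP (bs : List Int) (x : Int)
    (hs : bs.Pairwise (· ≤ ·)) :
    PySem.List.bisectLeft bs x = bs.countP (fun y => decide (y < x)) := by
  obtain ⟨hle, hlt, hge⟩ := PySem.List.bisectLeft_spec bs x hs
  set k := PySem.List.bisectLeft bs x with hk
  have htd : bs = bs.take k ++ bs.drop k := (List.take_append_drop k bs).symm
  rw [htd, List.countP_append]
  have h1 : (bs.take k).countP (fun y => decide (y < x)) = (bs.take k).length := by
    apply List.countP_eq_length.mpr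
    intro a ha
    obtain ⟨j, hj, rfl⟩ := List.mem_iff_getElem.mp ha
    have hjk : j < k := by
      have := hj; simp [List.length_take] at this; omega
    have hjlen : j < bs.length := lt_of_lt_of_le hjk hle
    have := hlt j hjlen hjk
    simp [List.getElem_take]
    exact this
  have h2 : (bs.drop k).countP (fun y => decide (y < x)) = 0 := by
    apply List.countP_eq_zero.mpr
    intro a ha
    obtain ⟨j, hj, rfl⟩ := List.mem_iff_getElem.mp ha
    have hjlen : k + j < bs.length := by
      have := hj; simp [List.length_drop] at this; omega
    have := hge (k + j) hjlen (Nat.le_add_right k j)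
    simp [List.getElem_drop]
    omega
  rw [h1, h2, List.length_take]
  omega

-- number of elements of the filtered range below a = count of the predicate on the prefix range
theorem countP_lt_filter_pyRange (bd : Int → Bool) (m a : Int)
    (h0 : 0 ≤ a) (ham : a ≤ m) :
    ((PySem.List.pyRange 0 m 1).filter bd).countP (fun y => decide (y < a))
      = (PySem.List.pyRange 0 a 1).countP bd := by
  rw [PySem.List.pyRange_one_append 0 a m h0 ham, List.filter_append, List.countP_append]
  have h1 : ((PySem.List.pyRange 0 a 1).filter bd).countP (fun y => decide (y < a))
      = ((PySem.List.pyRange 0 a 1).filter bd).length := by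
    apply List.countP_eq_length.mpr
    intro y hy
    have := (PySem.List.mem_pyRange_one).mp (List.mem_of_mem_filter hy)
    simp; omega
  have h2 : ((PySem.List.pyRange a m 1).filter bd).countP (fun y => decide (y < a)) = 0 := by
    apply List.countP_eq_zero.mpr
    intro y hy
    have := (PySem.List.mem_pyRange_one).mp (List.mem_of_mem_filter hy)
    simp; omega
  rw [h1, h2, ← List.countP_eq_length_filter]
  omega

-- the filtered range is sorted
theorem filter_pyRange_sorted (bd : Int → Bool) (m : Int) :
    ((PySem.List.pyRange 0 m 1).filter bd).Pairwise (· ≤ ·) := by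
  have := PySem.List.pairwise_lt_pyRange_one (a := 0) (b := m)
  exact (List.Pairwise.filter bd this).imp (fun h => le_of_lt h)

-- core row lemma: A's toggle scan of the suffix equals B's bisect-parity scan of the suffix
theorem row_equiv (sym : Int → String) (m : Int) (n : Nat) :
    ∀ (a : Int) (b : Bool) (c : Int), 0 ≤ a → a ≤ m → (m - a).toNat = n →
    b = ((PySem.List.pyRange 0 a 1).countP (fun j => PySem.Str.isIn (sym j) "7F|") % 2 == 1) →
    ((PySem.List.pyRange a m 1).foldl (fun (st : Bool × Int) j =>
        if PySem.Str.isIn (sym j) "7F|" then (!st.1, st.2)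
        else if sym j == "." && st.1 then (st.1, st.2 + 1)
        else st) (b, c)).2
    = (PySem.List.pyRange a m 1).foldl (fun count j =>
        if sym j == "."
           && (PySem.List.bisectLeft
                ((PySem.List.pyRange 0 m 1).filter (fun j => PySem.Str.isIn (sym j) "7F|")) j) % 2 == 1
        then count + 1 else count) c := by
  induction n with
  | zero =>
    intro a b c h0 ham hn hb
    rw [PySem.List.pyRange_one_eq_nil (by omega : m ≤ a)]
    simp
  | succ n ih =>
    intro a b c h0 ham hn hb
    have halt : a < m := by omega
    rw [PySem.List.pyRange_one_cons halt]
    simp only [List.foldl_cons]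
    have hbis : (PySem.List.bisectLeft
        ((PySem.List.pyRange 0 m 1).filter (fun j => PySem.Str.isIn (sym j) "7F|")) a % 2 == 1) = b := by
      rw [bisectLeft_eq_countP _ _ (filter_pyRange_sorted _ m),
          countP_lt_filter_pyRange _ m a h0 (le_of_lt halt), hb]
    have hsplit : PySem.List.pyRange 0 (a + 1) 1 = PySem.List.pyRange 0 a 1 ++ [a] :=
      PySem.List.pyRange_one_succ_right h0
    by_cases hba : PySem.Str.isIn (sym a) "7F|" = true
    · -- boundary cell: A toggles, B does not count it (sym a ≠ ".")
      have hdot : (sym a == ".") = false := by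
        by_cases hda : sym a = "."
        · exact absurd hba (by rw [hda]; decide)
        · simp [hda]
      simp only [hba, if_true, hdot, Bool.false_and, Bool.false_eq_true, if_false]
      have hb' : (!b) = ((PySem.List.pyRange 0 (a + 1) 1).countP
          (fun j => PySem.Str.isIn (sym j) "7F|") % 2 == 1) := by
        rw [hsplit, List.countP_append, hb]
        simp only [List.countP_cons, List.countP_nil, hba, if_true]
        generalize (List.countP (fun j => PySem.Str.isIn (sym j) "7F|") (PySem.List.pyRange 0 a 1)) = k
        rcases Nat.mod_two_eq_zero_or_one k with h | h <;> simp [Nat.add_mod, h]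
      exact ih (a + 1) (!b) c (by omega) (by omega) (by omega) hb'
    · -- non-boundary cell: the toggle state is untouched and equals the bisect parity
      have hba' : PySem.Str.isIn (sym a) "7F|" = false := Bool.eq_false_iff.mpr hba
      have hcount : (PySem.List.pyRange 0 (a+1) 1).countP (fun j => PySem.Str.isIn (sym j) "7F|")
          = (PySem.List.pyRange 0 a 1).countP (fun j => PySem.Str.isIn (sym j) "7F|") := by
        rw [hsplit, List.countP_append]
        simp only [List.countP_cons, List.countP_nil, hba', Bool.false_eq_true, if_false]
        omega
      simp only [hba', Bool.false_eq_true, if_false, hbis]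
      by_cases hda : (sym a == ".") = true
      · simp only [hda, Bool.true_and]
        by_cases hbv : b = true
        · subst hbv
          simp only [if_true]
          exact ih (a + 1) true (c + 1) (by omega) (by omega) (by omega) (by rw [hcount]; exact hb)
        · have hbf : b = false := Bool.eq_false_iff.mpr hbv
          subst hbf
          simp only [Bool.false_eq_true, if_false]
          exact ih (a + 1) false c (by omega) (by omega) (by omega) (by rw [hcount]; exact hb)
      · have hdf : (sym a == ".") = false := Bool.eq_false_iff.mpr hda
        simp only [hdf, Bool.false_and, Bool.false_eq_true, if_false]
        exact ih (a + 1) b c (by omega) (by omega) (by omega) (by rw [hcount]; exact hb)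


-- ------- abbreviations for the proof (B's intermediate data, spelled out) -------

def pvSym (board : List (Int × Int × String)) (i j : Int) : String :=
  PySem.Dict.getD (pvBoardDictB board) (i, j) "."

def pvBd (board : List (Int × Int × String)) (i j : Int) : Bool :=
  PySem.Str.isIn (pvSym board i j) "7F|"

def pvBsFull (board : List (Int × Int × String)) (i m : Int) : List Int :=
  (PySem.List.pyRange 0 m 1).filter (fun j => pvBd board i j)

def pvOdd (bs : List Int) (j : Int) : Bool := PySem.List.bisectLeft bs j % 2 == 1

-- the per-row value both programs compute, as a pointwise parity count
def pvG (board : List (Int × Int × String)) (i m : Int) : Int :=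
  ((PySem.List.pyRange 0 m 1).countP
    (fun j => pvSym board i j == "." && pvOdd (pvBsFull board i m) j) : Int)

-- the grouped (row, cell) pairs B builds, and the rows dict
def pvGl (board : List (Int × Int × String)) : List (Int × (Int × String)) :=
  ((pvBoardDictB board).items.filter (fun p => 0 ≤ p.1.1 && 0 ≤ p.1.2)).map
    (fun p => (p.1.1, (p.1.2, p.2)))

def pvRD (board : List (Int × Int × String)) : PySem.Dict Int (List (Int × String)) :=
  (pvGl board).foldl (fun d p => d.modify p.1 [] (· ++ [p.2])) PySem.Dict.empty

-- B's row body as a function of the raw cell list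
def pvRowB (max_j count : Int) (cellsRaw : List (Int × String)) : Int :=
  let cells := PySem.List.sorted cellsRaw (fun c => c.1) false
  let bs := (cells.filter (fun c => PySem.Str.isIn c.2 "7F|")).map (fun c => c.1)
  cells.foldl (fun count c =>
    if !(c.2 == ".") && (PySem.List.bisectLeft bs c.1 % 2 == 1) then count - 1 else count)
    (pvRowIntervals max_j bs count)

-- ------- generic helper lemmas -------

theorem pvRowIntervals_acc (mj : Int) (bs : List Int) (c : Int) :
    pvRowIntervals mj bs c = c + pvRowIntervals mj bs 0 := by
  match bs with
  | [] => simp [pvRowIntervals]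
  | [b] => simp [pvRowIntervals]
  | b0 :: b1 :: rest =>
    show pvRowIntervals mj rest (c + (b1 - b0)) = c + pvRowIntervals mj rest (0 + (b1 - b0))
    rw [pvRowIntervals_acc mj rest (c + (b1 - b0)), pvRowIntervals_acc mj rest (0 + (b1 - b0))]
    ring

theorem foldl_if_sub_one {α : Type} (p : α → Bool) (l : List α) (a : Int) :
    l.foldl (fun c x => if p x then c - 1 else c) a = a - (l.countP p : Int) := by
  induction l generalizing a with
  | nil => simp
  | cons x t ih =>
    simp only [List.foldl_cons, List.countP_cons]
    by_cases h : p x = true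
    · rw [if_pos h, ih, h]
      simp only [if_true]
      push_cast
      ring
    · rw [if_neg h, ih]
      simp [h]

theorem countP_and_split {α : Type} (q p : α → Bool) (l : List α) :
    l.countP (fun x => q x && p x) + l.countP (fun x => !q x && p x) = l.countP p := by
  induction l with
  | nil => simp
  | cons x t ih =>
    simp only [List.countP_cons]
    cases hq : q x <;> cases hp : p x <;> simp [*] <;> rw [← ih] <;> omega

-- counting the j with b < j in [a, c)
theorem countP_gt_range (a c b : Int) (hab : a ≤ b + 1) (hbc : b + 1 ≤ c) :
    (PySem.List.pyRange a c 1).countP (fun j => decide (b < j)) = (c - b - 1).toNat := by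
  rw [PySem.List.pyRange_one_append a (b + 1) c hab hbc, List.countP_append]
  have h1 : (PySem.List.pyRange a (b + 1) 1).countP (fun j => decide (b < j)) = 0 := by
    apply List.countP_eq_zero.mpr
    intro j hj
    have := PySem.List.mem_pyRange_one.mp hj
    simp
    omega
  have h2 : (PySem.List.pyRange (b + 1) c 1).countP (fun j => decide (b < j))
      = (PySem.List.pyRange (b + 1) c 1).length := by
    apply List.countP_eq_length.mpr
    intro j hj
    have := PySem.List.mem_pyRange_one.mp hj
    simp
    omega
  rw [h1, h2, PySem.List.length_pyRange_one]
  omega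

-- the interval recursion counts the odd-parity columns of [a, m)
theorem countP_odd_intervals_aux (m : Int) (n : Nat) :
    ∀ (bs : List Int) (a : Int), bs.length ≤ n → bs.Pairwise (· < ·) →
    (∀ b ∈ bs, a ≤ b ∧ b < m) →
    (((PySem.List.pyRange a m 1).countP
        (fun j => bs.countP (fun y => decide (y < j)) % 2 == 1) : Nat) : Int)
      = pvRowIntervals (m - 1) bs 0 := by
  induction n with
  | zero =>
    intro bs a hlen hs hmem
    have hbs : bs = [] := List.eq_nil_of_length_eq_zero (by omega)
    subst hbs
    have h0 : (PySem.List.pyRange a m 1).countP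
        (fun j => List.countP (fun y => decide (y < j)) [] % 2 == 1) = 0 := by
      apply List.countP_eq_zero.mpr
      intro j _
      simp
    rw [h0]
    simp [pvRowIntervals]
  | succ n ihn =>
    intro bs a hlen hs hmem
    rcases bs with _ | ⟨b0, bs'⟩
    · have h0 : (PySem.List.pyRange a m 1).countP
          (fun j => List.countP (fun y => decide (y < j)) [] % 2 == 1) = 0 := by
        apply List.countP_eq_zero.mpr
        intro j _
        simp
      rw [h0]
      simp [pvRowIntervals]
    rcases bs' with _ | ⟨b1, rest⟩
    · obtain ⟨hab, hbm⟩ := hmem b0 (by simp)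
      have hc : (PySem.List.pyRange a m 1).countP
            (fun j => List.countP (fun y => decide (y < j)) [b0] % 2 == 1)
          = (PySem.List.pyRange a m 1).countP (fun j => decide (b0 < j)) := by
        apply List.countP_congr
        intro j _
        by_cases hbj : b0 < j <;> simp [hbj]
      rw [hc, countP_gt_range a m b0 (by omega) (by omega)]
      simp only [pvRowIntervals]
      omega
    · obtain ⟨h0all, hs1⟩ := List.pairwise_cons.mp hs
      obtain ⟨h1all, hsrest⟩ := List.pairwise_cons.mp hs1
      obtain ⟨hab0, hb0m⟩ := hmem b0 (by simp)
      obtain ⟨hab1, hb1m⟩ := hmem b1 (by simp)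
      have hb01 : b0 < b1 := h0all b1 (by simp)
      rw [PySem.List.pyRange_one_append a (b1 + 1) m (by omega) (by omega), List.countP_append]
      have hL : (PySem.List.pyRange a (b1 + 1) 1).countP
            (fun j => List.countP (fun y => decide (y < j)) (b0 :: b1 :: rest) % 2 == 1)
          = (b1 - b0).toNat := by
        have hc : (PySem.List.pyRange a (b1 + 1) 1).countP
              (fun j => List.countP (fun y => decide (y < j)) (b0 :: b1 :: rest) % 2 == 1)
            = (PySem.List.pyRange a (b1 + 1) 1).countP (fun j => decide (b0 < j)) := by
          apply List.countP_congr
          intro j hj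
          have hjb : j < b1 + 1 := (PySem.List.mem_pyRange_one.mp hj).2
          have hrest : rest.countP (fun y => decide (y < j)) = 0 := by
            apply List.countP_eq_zero.mpr
            intro y hy
            have := h1all y hy
            simp
            omega
          simp only [List.countP_cons, hrest]
          have hb1j : ¬ b1 < j := by omega
          by_cases hbj : b0 < j <;> simp [hbj, hb1j]
        rw [hc, countP_gt_range a (b1 + 1) b0 (by omega) (by omega)]
        congr 1
        omega
      have hR : (PySem.List.pyRange (b1 + 1) m 1).countP
            (fun j => List.countP (fun y => decide (y < j)) (b0 :: b1 :: rest) % 2 == 1)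
          = (PySem.List.pyRange (b1 + 1) m 1).countP
              (fun j => List.countP (fun y => decide (y < j)) rest % 2 == 1) := by
        apply List.countP_congr
        intro j hj
        have hjb : b1 + 1 ≤ j := (PySem.List.mem_pyRange_one.mp hj).1
        have hb0j : b0 < j := by omega
        have hb1j : b1 < j := by omega
        simp only [List.countP_cons, hb0j, hb1j]
        have hmod : (rest.countP (fun y => decide (y < j)) + 1 + 1) % 2
            = rest.countP (fun y => decide (y < j)) % 2 := by omega
        simp [hmod]
      have ih := ihn rest (b1 + 1) (by simp at hlen ⊢; omega) hsrest
        (fun b hb => ⟨by have := h1all b hb; omega, (hmem b (by simp [hb])).2⟩)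
      rw [hL, hR]
      show (((b1 - b0).toNat + (PySem.List.pyRange (b1 + 1) m 1).countP
          (fun j => List.countP (fun y => decide (y < j)) rest % 2 == 1) : Nat) : Int)
        = pvRowIntervals (m - 1) rest (0 + (b1 - b0))
      rw [pvRowIntervals_acc, ← ih]
      push_cast
      omega

theorem countP_odd_intervals (m : Int) (bs : List Int) (a : Int)
    (hs : bs.Pairwise (· < ·)) (hmem : ∀ b ∈ bs, a ≤ b ∧ b < m) :
    (((PySem.List.pyRange a m 1).countP
        (fun j => bs.countP (fun y => decide (y < j)) % 2 == 1) : Nat) : Int)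
      = pvRowIntervals (m - 1) bs 0 :=
  countP_odd_intervals_aux m bs.length bs a le_rfl hs hmem

-- ------- facts about B's data -------

theorem pvRD_keys_nodup (board : List (Int × Int × String)) : (pvRD board).keys.Nodup := by
  unfold pvRD
  exact PySem.Dict.nodup_keys_foldl_modify_key (pvGl board) (fun p => p.1) []
    (fun _ p => (· ++ [p.2])) PySem.Dict.empty (by simp [PySem.Dict.keys_empty])

theorem mem_pvRD_keys (board : List (Int × Int × String)) (i : Int) :
    i ∈ (pvRD board).keys ↔ i ∈ (pvGl board).map (fun p => p.1) := by
  unfold pvRD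
  rw [PySem.Dict.keys_foldl_modify_key (pvGl board) (fun p => p.1) []
    (fun _ p => (· ++ [p.2])) PySem.Dict.empty]
  rw [PySem.Set.mem_update]
  simp [PySem.Dict.keys_empty]

theorem pvRD_getD (board : List (Int × Int × String)) (i : Int) :
    (pvRD board).getD i [] = ((pvGl board).filter (fun p => p.1 == i)).map (fun p => p.2) := by
  unfold pvRD
  rw [PySem.Dict.getD_foldl_modify_append (pvGl board) PySem.Dict.empty i]
  simp [PySem.Dict.getD_empty]

theorem mem_cellsRaw (board : List (Int × Int × String)) (i : Int) (hi0 : 0 ≤ i) (j : Int) (s : String) :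
    (j, s) ∈ (pvRD board).getD i [] ↔ ((i, j), s) ∈ (pvBoardDictB board).items ∧ 0 ≤ j := by
  rw [pvRD_getD]
  unfold pvGl
  constructor
  · intro h
    obtain ⟨p, hp, hpe⟩ := List.mem_map.mp h
    obtain ⟨hp1, hp2⟩ := List.mem_filter.mp hp
    obtain ⟨q, hq, hqe⟩ := List.mem_map.mp hp1
    obtain ⟨hq1, hq2⟩ := List.mem_filter.mp hq
    subst hqe
    have hq11 : q.1.1 = i := by simpa using hp2
    have hj : q.1.2 = j := by simpa using congrArg Prod.fst hpe
    have hsval : q.2 = s := by simpa using congrArg Prod.snd hpe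
    have hj0 : 0 ≤ q.1.2 := by simp at hq2; exact hq2.2
    refine ⟨?_, hj ▸ hj0⟩
    have : ((i, j), s) = q := by
      ext <;> simp [← hq11, ← hj, ← hsval]
    rw [this]
    exact hq1
  · rintro ⟨hmem, hj0⟩
    refine List.mem_map.mpr ⟨(i, (j, s)), List.mem_filter.mpr ⟨?_, by simp⟩, rfl⟩
    exact List.mem_map.mpr ⟨((i, j), s), List.mem_filter.mpr ⟨hmem, by simp [hi0, hj0]⟩, rfl⟩

theorem pvD_keys_nodup (board : List (Int × Int × String)) :
    (pvBoardDictB board).keys.Nodup := by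
  unfold pvBoardDictB
  exact PySem.Dict.nodup_keys_ofList _

theorem sym_of_mem_items (board : List (Int × Int × String)) (i j : Int) (s : String)
    (h : ((i, j), s) ∈ (pvBoardDictB board).items) : pvSym board i j = s := by
  unfold pvSym
  exact PySem.Dict.getD_of_mem_items _ h (pvD_keys_nodup board) "."

theorem mem_items_of_sym (board : List (Int × Int × String)) (i j : Int)
    (h : pvSym board i j ≠ ".") : ((i, j), pvSym board i j) ∈ (pvBoardDictB board).items := by
  by_cases hc : (pvBoardDictB board).contains (i, j) = true
  · rw [PySem.Dict.contains_eq_isSome_get?] at hc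
    obtain ⟨s, hs⟩ := Option.isSome_iff_exists.mp hc
    have hgd : pvSym board i j = s := by
      unfold pvSym
      exact PySem.Dict.getD_of_get?_eq_some _ _ hs
    rw [hgd]
    exact PySem.Dict.mem_items_of_get?_eq_some _ hs
  · exact absurd (by unfold pvSym; exact PySem.Dict.getD_of_not_contains _ _ (by simpa using hc)) h

theorem key_le_max (board : List (Int × Int × String)) (i j : Int) (s : String)
    (h : ((i, j), s) ∈ (pvBoardDictB board).items) :
    i ∈ board.map (fun p => p.1) ∧ j ∈ board.map (fun p => p.2.1) := by
  have hk : (i, j) ∈ (pvBoardDictB board).keys := PySem.Dict.mem_keys_of_mem_items _ h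
  have hk2 : (i, j) ∈ (board.map (fun p => ((p.1, p.2.1), p.2.2))).map (fun p => p.1) := by
    have hkeys : (pvBoardDictB board).keys
        = PySem.Set.update (PySem.Dict.empty : PySem.Dict (Int × Int) String).keys
            ((board.map (fun p => ((p.1, p.2.1), p.2.2))).map (fun p => p.1)) := by
      unfold pvBoardDictB PySem.Dict.ofList PySem.Dict.update
      exact PySem.Dict.keys_foldl_insert_key (κ := Int × Int) (ν := String)
        (β := (Int × Int) × String) (board.map (fun p => ((p.1, p.2.1), p.2.2)))
        (fun p => p.1) (fun _ p => p.2) PySem.Dict.empty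
    rw [hkeys, PySem.Set.mem_update] at hk
    simpa [PySem.Dict.keys_empty] using hk
  rw [List.map_map] at hk2
  obtain ⟨p, hp, hpe⟩ := List.mem_map.mp hk2
  constructor
  · exact List.mem_map.mpr ⟨p, hp, by simpa using congrArg Prod.fst hpe⟩
  · exact List.mem_map.mpr ⟨p, hp, by simpa using congrArg Prod.snd hpe⟩

theorem cellsRaw_firsts_nodup (board : List (Int × Int × String)) (i : Int) :
    (((pvRD board).getD i []).map (fun c => c.1)).Nodup := by
  rw [pvRD_getD]
  unfold pvGl
  rw [List.filter_map, List.map_map, List.map_map]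
  have hsubL : ((pvBoardDictB board).items.filter
      (fun p => 0 ≤ p.1.1 && 0 ≤ p.1.2)).Sublist (pvBoardDictB board).items :=
    List.filter_sublist
  have hknd : (((pvBoardDictB board).items.filter
      (fun p => 0 ≤ p.1.1 && 0 ≤ p.1.2)).map (fun p => p.1)).Nodup := by
    have h0 : ((pvBoardDictB board).items.map (fun p => p.1)).Nodup := by
      simpa [PySem.Dict.keys] using pvD_keys_nodup board
    exact h0.sublist (hsubL.map (fun p => p.1))
  apply List.Nodup.map_on
  · intro x hx y hy hxy
    have hx' := List.mem_filter.mp hx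
    have hy' := List.mem_filter.mp hy
    have hxi : x.1.1 = i := by simpa using hx'.2
    have hyi : y.1.1 = i := by simpa using hy'.2
    have hxy2 : x.1.2 = y.1.2 := by simpa [Function.comp] using hxy
    have hkey : x.1 = y.1 := by
      ext
      · rw [hxi, hyi]
      · exact hxy2
    exact List.inj_on_of_nodup_map hknd hx'.1 hy'.1 hkey
  · exact (List.Nodup.of_map _ hknd).filter _

-- two strictly increasing Int lists with the same members are equal
theorem eq_of_pairwise_lt_of_mem {l₁ l₂ : List Int}
    (h₁ : l₁.Pairwise (· < ·)) (h₂ : l₂.Pairwise (· < ·)) (h : ∀ x, x ∈ l₁ ↔ x ∈ l₂) :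
    l₁ = l₂ := by
  have hn₁ : l₁.Nodup := List.nodup_iff_pairwise_ne.mpr (h₁.imp ne_of_lt)
  have hn₂ : l₂.Nodup := List.nodup_iff_pairwise_ne.mpr (h₂.imp ne_of_lt)
  have hperm := (List.perm_ext_iff_of_nodup hn₁ hn₂).mpr h
  exact List.Perm.eq_of_pairwise (fun a _ _ _ h1 h2 => le_antisymm h1 h2)
    (h₁.imp le_of_lt) (h₂.imp le_of_lt) hperm

-- the sorted cell list of a row is strictly increasing in the column
theorem cells_pairwise_lt (board : List (Int × Int × String)) (i : Int) :
    (PySem.List.sorted ((pvRD board).getD i []) (fun c => c.1) false).Pairwise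
      (fun a b => a.1 < b.1) := by
  have hperm := PySem.List.sorted_perm ((pvRD board).getD i []) (fun c => c.1) false
  have hple := PySem.List.sorted_pairwise ((pvRD board).getD i []) (fun c => c.1)
  have hnd : ((PySem.List.sorted ((pvRD board).getD i []) (fun c => c.1) false).map
      (fun c => c.1)).Nodup :=
    ((List.Perm.nodup_iff (hperm.map _)).mpr (cellsRaw_firsts_nodup board i))
  have hpne := List.pairwise_map.mp (List.nodup_iff_pairwise_ne.mp hnd)
  exact (hple.and hpne).imp (fun hab => lt_of_le_of_ne hab.1 hab.2)

-- the two views of a row's cells with a given property on the symbol agree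
theorem filter_range_eq_cells (board : List (Int × Int × String)) (max_j i : Int) (hi0 : 0 ≤ i)
    (hmj : PySem.List.max? (board.map (fun p => p.2.1)) (fun x => x) = some max_j)
    (q : String → Bool) (hq : q "." = false) :
    (PySem.List.pyRange 0 (max_j + 1) 1).filter (fun j => q (pvSym board i j))
      = ((PySem.List.sorted ((pvRD board).getD i []) (fun c => c.1) false).filter
          (fun c => q c.2)).map (fun c => c.1) := by
  have hperm := PySem.List.sorted_perm ((pvRD board).getD i []) (fun c => c.1) false
  apply eq_of_pairwise_lt_of_mem
  · exact (PySem.List.pairwise_lt_pyRange_one 0 (max_j + 1)).filter _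
  · exact List.pairwise_map.mpr ((cells_pairwise_lt board i).filter _)
  · intro x
    constructor
    · intro hx
      obtain ⟨hxr, hxq⟩ := List.mem_filter.mp hx
      obtain ⟨hx0, hxm⟩ := PySem.List.mem_pyRange_one.mp hxr
      have hsne : pvSym board i x ≠ "." := by
        intro hdot
        rw [hdot] at hxq
        rw [hq] at hxq
        exact Bool.false_ne_true hxq
      have hm := mem_items_of_sym board i x hsne
      have hcr : (x, pvSym board i x) ∈ (pvRD board).getD i [] :=
        (mem_cellsRaw board i hi0 x (pvSym board i x)).mpr ⟨hm, hx0⟩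
      refine List.mem_map.mpr ⟨(x, pvSym board i x),
        List.mem_filter.mpr ⟨hperm.mem_iff.mpr hcr, hxq⟩, rfl⟩
    · intro hx
      obtain ⟨c, hc, hce⟩ := List.mem_map.mp hx
      obtain ⟨hc1, hc2⟩ := List.mem_filter.mp hc
      have hcr := hperm.mem_iff.mp hc1
      rw [show c = (c.1, c.2) from rfl, hce] at hcr
      obtain ⟨hm, hx0⟩ := (mem_cellsRaw board i hi0 x c.2).mp hcr
      have hsym := sym_of_mem_items board i x c.2 hm
      have hxle : x ≤ max_j := by
        have hb := (key_le_max board i x c.2 hm).2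
        exact PySem.List.max?_isMax hmj _ hb
      refine List.mem_filter.mpr ⟨PySem.List.mem_pyRange_one.mpr ⟨hx0, by omega⟩, ?_⟩
      rw [hsym]
      exact hc2

-- ------- the three summation forms -------

theorem A_sum (board : List (Int × Int × String)) (max_i max_j : Int)
    (hmi : PySem.List.max? (board.map (fun p => p.1)) (fun x => x) = some max_i)
    (hmj : PySem.List.max? (board.map (fun p => p.2.1)) (fun x => x) = some max_j) :
    count_inside_locations board
      = ((PySem.List.pyRange 0 (max_i + 1) 1).map (fun i => pvG board i (max_j + 1))).sum := by
  unfold count_inside_locations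
  simp only [hmi, hmj]
  rw [show ((PySem.List.pyRange 0 (max_i + 1) 1).map (fun i => pvG board i (max_j + 1))).sum
      = 0 + ((PySem.List.pyRange 0 (max_i + 1) 1).map (fun i => pvG board i (max_j + 1))).sum
    from (zero_add _).symm]
  rw [← PySem.List.foldl_add (PySem.List.pyRange 0 (max_i + 1) 1)
    (fun i => pvG board i (max_j + 1)) 0]
  apply PySem.List.foldl_congr_mem
  intro count i _
  by_cases hm : 0 ≤ max_j + 1
  · rw [row_equiv (fun j => PySem.Dict.getD (pvBoardDictA board) (i, j) ".")
      (max_j + 1) (max_j + 1).toNat 0 false count le_rfl hm (by omega)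
      (by rw [PySem.List.pyRange_one_eq_nil le_rfl]; simp)]
    rw [PySem.List.foldl_if_add_one]
    unfold pvG pvSym pvOdd pvBsFull pvBd pvSym pvBoardDictA pvBoardDictB
    rfl
  · rw [PySem.List.pyRange_one_eq_nil (show max_j + 1 ≤ (0:Int) by omega)]
    unfold pvG
    rw [PySem.List.pyRange_one_eq_nil (show max_j + 1 ≤ (0:Int) by omega)]
    simp

theorem B_sum (board : List (Int × Int × String)) (max_i max_j : Int)
    (hmi : PySem.List.max? (board.map (fun p => p.1)) (fun x => x) = some max_i)
    (hmj : PySem.List.max? (board.map (fun p => p.2.1)) (fun x => x) = some max_j) :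
    count_inside_locations_alt board
      = ((pvRD board).keys.map (fun i => pvRowB max_j 0 ((pvRD board).getD i []))).sum := by
  unfold count_inside_locations_alt
  simp only [hmi, hmj]
  have hrows : (pvBoardDictB board).items.foldl (fun d p =>
        if 0 ≤ p.1.1 && 0 ≤ p.1.2 then d.modify p.1.1 [] (· ++ [(p.1.2, p.2)]) else d)
        PySem.Dict.empty = pvRD board := by
    unfold pvRD pvGl
    rw [List.foldl_map]
    exact PySem.List.foldl_if_eq_foldl_filter _ _ _ _
  rw [hrows]
  rw [PySem.Dict.items_eq_map_keys (pvRD board) (pvRD_keys_nodup board) []]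
  rw [List.foldl_map]
  rw [show ((pvRD board).keys.map (fun i => pvRowB max_j 0 ((pvRD board).getD i []))).sum
      = 0 + ((pvRD board).keys.map (fun i => pvRowB max_j 0 ((pvRD board).getD i []))).sum
    from (zero_add _).symm]
  rw [← PySem.List.foldl_add ((pvRD board).keys)
    (fun i => pvRowB max_j 0 ((pvRD board).getD i [])) 0]
  apply PySem.List.foldl_congr_mem
  intro count i _
  show (PySem.List.sorted ((pvRD board).getD i []) (fun c => c.1) false).foldl _ _ = _
  rw [foldl_if_sub_one, pvRowIntervals_acc]
  unfold pvRowB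
  rw [foldl_if_sub_one]
  ring

theorem row_core (board : List (Int × Int × String)) (max_j i : Int) (hi0 : 0 ≤ i)
    (hmj : PySem.List.max? (board.map (fun p => p.2.1)) (fun x => x) = some max_j) :
    pvRowB max_j 0 ((pvRD board).getD i []) = pvG board i (max_j + 1) := by
  have hbsfull : pvBsFull board i (max_j + 1)
      = ((PySem.List.sorted ((pvRD board).getD i []) (fun c => c.1) false).filter
          (fun c => PySem.Str.isIn c.2 "7F|")).map (fun c => c.1) := by
    unfold pvBsFull pvBd
    exact filter_range_eq_cells board max_j i hi0 hmj (fun s => PySem.Str.isIn s "7F|")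
      (by decide)
  set cells := PySem.List.sorted ((pvRD board).getD i []) (fun c => c.1) false with hcells
  set bs := (cells.filter (fun c => PySem.Str.isIn c.2 "7F|")).map (fun c => c.1) with hbs
  have hbs_lt : bs.Pairwise (· < ·) :=
    List.pairwise_map.mpr ((cells_pairwise_lt board i).filter _)
  have hbs_le : bs.Pairwise (· ≤ ·) := hbs_lt.imp le_of_lt
  have hbs_mem : ∀ b ∈ bs, 0 ≤ b ∧ b < max_j + 1 := by
    intro b hb
    rw [← hbsfull] at hb
    unfold pvBsFull at hb
    have := PySem.List.mem_pyRange_one.mp (List.mem_of_mem_filter hb)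
    omega
  have hoddeq : ∀ j : Int, pvOdd bs j = (bs.countP (fun y => decide (y < j)) % 2 == 1) := by
    intro j
    unfold pvOdd
    rw [bisectLeft_eq_countP bs j hbs_le]
  -- interval sum = pointwise odd-parity count
  have hint : pvRowIntervals max_j bs 0
      = (((PySem.List.pyRange 0 (max_j + 1) 1).countP (fun j => pvOdd bs j) : Nat) : Int) := by
    have h := countP_odd_intervals (max_j + 1) bs 0 hbs_lt hbs_mem
    rw [show (max_j + 1 - 1 : Int) = max_j by ring] at h
    have hc : (PySem.List.pyRange 0 (max_j + 1) 1).countP (fun j => pvOdd bs j)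
        = (PySem.List.pyRange 0 (max_j + 1) 1).countP
            (fun j => bs.countP (fun y => decide (y < j)) % 2 == 1) :=
      List.countP_congr (fun j _ => by rw [hoddeq j])
    rw [← h, hc]
  -- subtracted count = pointwise count of non-'.' cells at odd parity
  have hsub : cells.countP (fun c => !(c.2 == ".") && (PySem.List.bisectLeft bs c.1 % 2 == 1))
      = (PySem.List.pyRange 0 (max_j + 1) 1).countP
          (fun j => !(pvSym board i j == ".") && pvOdd bs j) := by
    have e1 : cells.countP (fun c => !(c.2 == ".") && (PySem.List.bisectLeft bs c.1 % 2 == 1))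
        = (cells.filter (fun c => !(c.2 == "."))).countP (fun c => pvOdd bs c.1) := by
      rw [List.countP_filter]
      apply List.countP_congr
      intro c _
      unfold pvOdd
      cases (c.2 == ".") <;> cases hx : (PySem.List.bisectLeft bs c.1 % 2 == 1) <;> simp [*]
    have e2 : (cells.filter (fun c => !(c.2 == "."))).countP (fun c => pvOdd bs c.1)
        = ((cells.filter (fun c => !(c.2 == "."))).map (fun c => c.1)).countP (pvOdd bs) := by
      rw [List.countP_map]
      rfl
    have e3 : ((cells.filter (fun c => !(c.2 == "."))).map (fun c => c.1)).countP (pvOdd bs)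
        = ((PySem.List.pyRange 0 (max_j + 1) 1).filter
            (fun j => !(pvSym board i j == "."))).countP (pvOdd bs) := by
      rw [filter_range_eq_cells board max_j i hi0 hmj (fun s => !(s == ".")) (by decide)]
    have e4 : ((PySem.List.pyRange 0 (max_j + 1) 1).filter
          (fun j => !(pvSym board i j == "."))).countP (pvOdd bs)
        = (PySem.List.pyRange 0 (max_j + 1) 1).countP
            (fun j => !(pvSym board i j == ".") && pvOdd bs j) := by
      rw [List.countP_filter]
      apply List.countP_congr
      intro j _
      cases (pvSym board i j == ".") <;> cases hx : pvOdd bs j <;> simp [*]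
    rw [e1, e2, e3, e4]
  have hsplit := countP_and_split (fun j => pvSym board i j == ".") (fun j => pvOdd bs j)
    (PySem.List.pyRange 0 (max_j + 1) 1)
  have hG : pvG board i (max_j + 1)
      = (((PySem.List.pyRange 0 (max_j + 1) 1).countP
          (fun j => pvSym board i j == "." && pvOdd bs j) : Nat) : Int) := by
    unfold pvG
    rw [hbsfull]
  show cells.foldl _ _ = _
  rw [foldl_if_sub_one]
  rw [hint, hG, hsub]
  omega

theorem absent_row (board : List (Int × Int × String)) (max_j i : Int) (hi0 : 0 ≤ i)
    (h : i ∉ (pvRD board).keys) : pvG board i (max_j + 1) = 0 := by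
  have hsym : ∀ x : Int, 0 ≤ x → pvSym board i x = "." := by
    intro x hx0
    by_contra hne
    have hm := mem_items_of_sym board i x hne
    apply h
    apply (mem_pvRD_keys board i).mpr
    unfold pvGl
    rw [List.map_map]
    exact List.mem_map.mpr ⟨((i, x), pvSym board i x),
      List.mem_filter.mpr ⟨hm, by simp [hi0, hx0]⟩, rfl⟩
  unfold pvG
  have hz : (PySem.List.pyRange 0 (max_j + 1) 1).countP
      (fun j => pvSym board i j == "." && pvOdd (pvBsFull board i (max_j + 1)) j) = 0 := by
    apply List.countP_eq_zero.mpr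
    intro j hj
    have hbs : pvBsFull board i (max_j + 1) = [] := by
      unfold pvBsFull
      apply List.filter_eq_nil_iff.mpr
      intro x hx
      have hx0 : 0 ≤ x := (PySem.List.mem_pyRange_one.mp hx).1
      unfold pvBd
      rw [hsym x hx0]
      decide
    rw [hbs]
    unfold pvOdd
    rw [bisectLeft_eq_countP [] j List.Pairwise.nil]
    simp
  rw [hz]
  simp

theorem sums_eq (board : List (Int × Int × String)) (max_i max_j : Int)
    (hmi : PySem.List.max? (board.map (fun p => p.1)) (fun x => x) = some max_i)
    (_hmj : PySem.List.max? (board.map (fun p => p.2.1)) (fun x => x) = some max_j) :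
    ((PySem.List.pyRange 0 (max_i + 1) 1).map (fun i => pvG board i (max_j + 1))).sum
      = ((pvRD board).keys.map (fun i => pvG board i (max_j + 1))).sum := by
  have hK : ∀ i ∈ (pvRD board).keys, 0 ≤ i ∧ i ≤ max_i := by
    intro i hik
    have := (mem_pvRD_keys board i).mp hik
    unfold pvGl at this
    rw [List.map_map] at this
    obtain ⟨q, hq, hqe⟩ := List.mem_map.mp this
    obtain ⟨hq1, hq2⟩ := List.mem_filter.mp hq
    have hq0 : 0 ≤ q.1.1 := by simp at hq2; exact hq2.1
    have hle : q.1.1 ≤ max_i := by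
      have hb : q.1.1 ∈ board.map (fun p => p.1) :=
        (key_le_max board q.1.1 q.1.2 q.2 (by simpa using hq1)).1
      exact PySem.List.max?_isMax hmi _ hb
    simp only [← hqe]
    exact ⟨hq0, hle⟩
  have hperm := List.filter_append_perm (fun i => decide (i ∈ (pvRD board).keys))
    (PySem.List.pyRange 0 (max_i + 1) 1)
  rw [← (hperm.map (fun i => pvG board i (max_j + 1))).sum_eq]
  rw [List.map_append, List.sum_append]
  have hz : (((PySem.List.pyRange 0 (max_i + 1) 1).filter
      (fun i => !decide (i ∈ (pvRD board).keys))).map (fun i => pvG board i (max_j + 1))).sum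
      = 0 := by
    apply List.sum_eq_zero
    intro x hx
    obtain ⟨i, hi, hie⟩ := List.mem_map.mp hx
    obtain ⟨hir, hink⟩ := List.mem_filter.mp hi
    have hi0 : 0 ≤ i := (PySem.List.mem_pyRange_one.mp hir).1
    have hnk : i ∉ (pvRD board).keys := by simpa using hink
    rw [← hie]
    exact absent_row board max_j i hi0 hnk
  rw [hz, add_zero]
  have hpk : ((PySem.List.pyRange 0 (max_i + 1) 1).filter
      (fun i => decide (i ∈ (pvRD board).keys))).Perm (pvRD board).keys := by
    apply (List.perm_ext_iff_of_nodup
      ((PySem.List.nodup_pyRange_one _ _).filter _) (pvRD_keys_nodup board)).mpr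
    intro a
    constructor
    · intro ha
      have := List.mem_filter.mp ha
      simpa using this.2
    · intro ha
      refine List.mem_filter.mpr ⟨?_, by simpa using ha⟩
      have := hK a ha
      exact PySem.List.mem_pyRange_one.mpr ⟨this.1, by omega⟩
  exact (hpk.map (fun i => pvG board i (max_j + 1))).sum_eq

-- ===== VERDICT (by name: the statement is the Claim_ definition above) =====
theorem count_inside_locations_spec : Claim_equal_count_inside_locations := by
  intro board _ _
  unfold Spec_count_inside_locations
  cases hmi : PySem.List.max? (board.map (fun p => p.1)) (fun x => x) with
  | none =>
    unfold count_inside_locations count_inside_locations_alt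
    rw [hmi]
  | some max_i =>
    cases hmj : PySem.List.max? (board.map (fun p => p.2.1)) (fun x => x) with
    | none =>
      unfold count_inside_locations count_inside_locations_alt
      rw [hmi, hmj]
    | some max_j =>
      rw [A_sum board max_i max_j hmi hmj, B_sum board max_i max_j hmi hmj,
          sums_eq board max_i max_j hmi hmj]
      congr 1
      apply List.map_congr_left
      intro i hik
      have hi0 : 0 ≤ i := by
        have := (mem_pvRD_keys board i).mp hik
        obtain ⟨p, hp, rfl⟩ := List.mem_map.mp this
        obtain ⟨q, hq, rfl⟩ := List.mem_map.mp hp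
        have := List.of_mem_filter hq
        simp at this
        exact_mod_cast this.1
      exact (row_core board max_j i hi0 hmj).symm
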